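-- pv_equiv track=rewrite | github.com/marcus-aurelianus/codeforce | round685/spdx_Q4.py | solve
-- ===== SOURCE A (Python) =====
-- def solve(aAB,aBC,aCA,oAB,oBC):
--
--     ans = []
--
--     for A in range(2):
--         for B in range(2):
--             for C in range(2):
--
--                 if A&B==aAB and B&C==aBC and C&A==aCA and A|B==oAB and B|C==oBC: # and C|A==oCA:
--                     return A,B,C
--
--     return None,None,None
-- ===== SOURCE B (Python) =====
-- def solve(aAB, aBC, aCA, oAB, oBC):
--     # Forward constraint propagation: for each A in {0,1}, B and C are forced.
--     for A in (0, 1):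
--         if A == 0:
--             if aAB != 0:
--                 continue
--             B = oAB
--         else:
--             if oAB != 1:
--                 continue
--             B = aAB
--         if B == 0:
--             if aBC != 0:
--                 continue
--             C = oBC
--         elif B == 1:
--             if oBC != 1:
--                 continue
--             C = aBC
--         else:
--             continue
--         if C in (0, 1) and C & A == aCA:
--             return A, B, C
--     return None, None, None
-- ===== Notes on version B (the rewrite author's own statement) =====
-- stated objective: simpler
-- what changed: Replaced the 2x2x2 enumerate-and-test over all bit triples with forward constraint propagation: for each A in {0,1} the unique B is deduced from aAB/oAB and the unique C from aBC/oBC, then aCA is verified, preserving the first-match order.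
import Mathlib
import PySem

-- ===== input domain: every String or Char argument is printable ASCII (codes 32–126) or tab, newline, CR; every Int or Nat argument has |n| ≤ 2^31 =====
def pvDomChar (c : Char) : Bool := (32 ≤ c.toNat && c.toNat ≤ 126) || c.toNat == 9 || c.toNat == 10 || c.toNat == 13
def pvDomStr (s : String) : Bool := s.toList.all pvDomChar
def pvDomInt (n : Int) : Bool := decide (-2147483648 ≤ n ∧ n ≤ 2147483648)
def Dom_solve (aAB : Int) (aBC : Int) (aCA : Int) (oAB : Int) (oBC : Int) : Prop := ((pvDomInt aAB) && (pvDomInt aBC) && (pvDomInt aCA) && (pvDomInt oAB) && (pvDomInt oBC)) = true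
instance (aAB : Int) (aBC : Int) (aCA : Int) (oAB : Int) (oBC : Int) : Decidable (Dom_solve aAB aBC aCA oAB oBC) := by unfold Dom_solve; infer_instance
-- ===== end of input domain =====

-- B replaces A's 2×2×2 enumerate-and-test with forward constraint propagation (B forced from A, C from B), same first-match result; objective: simpler.


-- ===== PORT A =====
-- triple nested for-loops over range(2) with early return, as findSome? over pyRange
def solve (aAB : Int) (aBC : Int) (aCA : Int) (oAB : Int) (oBC : Int) : Option Int × Option Int × Option Int :=
  match (PySem.List.pyRange 0 2 1).findSome? (fun A =>
        (PySem.List.pyRange 0 2 1).findSome? (fun B =>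
        (PySem.List.pyRange 0 2 1).findSome? (fun C =>
          if A.land B = aAB ∧ B.land C = aBC ∧ C.land A = aCA ∧ A.lor B = oAB ∧ B.lor C = oBC
          then some (A, B, C) else none))) with
  | some (A, B, C) => (some A, some B, some C)
  | none => (none, none, none)

-- ===== PORT B =====
-- forward propagation for one candidate A: deduce forced B (continue = none), then forced C, then check aCA
def solveFin (aCA A B C : Int) : Option (Int × Int × Int) :=
  if (C = 0 ∨ C = 1) ∧ C.land A = aCA then some (A, B, C) else none

def solveTryC (aBC aCA oBC A B : Int) : Option (Int × Int × Int) :=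
  if B = 0 then (if aBC = 0 then solveFin aCA A B oBC else none)
  else if B = 1 then (if oBC = 1 then solveFin aCA A B aBC else none)
  else none

def solveTry (aAB : Int) (aBC : Int) (aCA : Int) (oAB : Int) (oBC : Int) (A : Int) :
    Option (Int × Int × Int) :=
  if A = 0 then (if aAB = 0 then solveTryC aBC aCA oBC A oAB else none)
  else (if oAB = 1 then solveTryC aBC aCA oBC A aAB else none)

def solve_alt (aAB : Int) (aBC : Int) (aCA : Int) (oAB : Int) (oBC : Int) : Option Int × Option Int × Option Int :=
  match [(0 : Int), 1].findSome? (solveTry aAB aBC aCA oAB oBC) with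
  | some (A, B, C) => (some A, some B, some C)
  | none => (none, none, none)

-- ===== PRECONDITION & SPEC =====
def Spec_solve (aAB : Int) (aBC : Int) (aCA : Int) (oAB : Int) (oBC : Int) (out : Option Int × Option Int × Option Int) : Prop := out = solve_alt aAB aBC aCA oAB oBC
instance (aAB : Int) (aBC : Int) (aCA : Int) (oAB : Int) (oBC : Int) (out : Option Int × Option Int × Option Int) : Decidable (Spec_solve aAB aBC aCA oAB oBC out) := by unfold Spec_solve; infer_instance

-- ===== CLAIM (what is proved, stated in full; the proofs are below) =====
def Claim_equal_solve : Prop := ∀ (aAB : Int) (aBC : Int) (aCA : Int) (oAB : Int) (oBC : Int), Dom_solve aAB aBC aCA oAB oBC → Spec_solve aAB aBC aCA oAB oBC (solve aAB aBC aCA oAB oBC)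

-- ===== LEMMAS AND PROOFS =====
theorem land_zero' (x : Int) : x.land 0 = 0 := by
  cases x <;> simp [Int.land, Nat.ldiff]

theorem land_one_iff (x y : Int) :
    ((x = 0 ∨ x = 1) ∧ x.land 1 = y) ↔ ((x = 0 ∧ y = 0) ∨ (x = 1 ∧ y = 1)) := by
  constructor
  · rintro ⟨h0 | h0, hl⟩ <;> subst h0 <;> simp_all [Int.land]
  · rintro (⟨h0, h1⟩ | ⟨h0, h1⟩) <;> subst h0 <;> subst h1 <;> simp [Int.land]

theorem solve_none (aAB aBC aCA oAB oBC : Int)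
    (h : ¬((aAB = 0 ∨ aAB = 1) ∧ (aBC = 0 ∨ aBC = 1) ∧ (aCA = 0 ∨ aCA = 1) ∧
           (oAB = 0 ∨ oAB = 1) ∧ (oBC = 0 ∨ oBC = 1))) :
    solve aAB aBC aCA oAB oBC = (none, none, none) := by
  unfold solve
  simp only [show PySem.List.pyRange 0 2 1 = [(0:Int),1] from by decide,
    List.findSome?_cons, List.findSome?_nil,
    show ((0:Int).land 0) = 0 from rfl, show ((0:Int).land 1) = 0 from rfl,
    show ((1:Int).land 0) = 0 from rfl, show ((1:Int).land 1) = 1 from rfl,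
    show ((0:Int).lor 0) = 0 from rfl, show ((0:Int).lor 1) = 1 from rfl,
    show ((1:Int).lor 0) = 1 from rfl, show ((1:Int).lor 1) = 1 from rfl]
  rw [
    if_neg (show ¬((0:Int) = aAB ∧ (0:Int) = aBC ∧ (0:Int) = aCA ∧ (0:Int) = oAB ∧ (0:Int) = oBC) from by omega),
    if_neg (show ¬((0:Int) = aAB ∧ (0:Int) = aBC ∧ (0:Int) = aCA ∧ (0:Int) = oAB ∧ (1:Int) = oBC) from by omega),
    if_neg (show ¬((0:Int) = aAB ∧ (0:Int) = aBC ∧ (0:Int) = aCA ∧ (1:Int) = oAB ∧ (1:Int) = oBC) from by omega),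
    if_neg (show ¬((0:Int) = aAB ∧ (1:Int) = aBC ∧ (0:Int) = aCA ∧ (1:Int) = oAB ∧ (1:Int) = oBC) from by omega),
    if_neg (show ¬((0:Int) = aAB ∧ (0:Int) = aBC ∧ (0:Int) = aCA ∧ (1:Int) = oAB ∧ (0:Int) = oBC) from by omega),
    if_neg (show ¬((0:Int) = aAB ∧ (0:Int) = aBC ∧ (1:Int) = aCA ∧ (1:Int) = oAB ∧ (1:Int) = oBC) from by omega),
    if_neg (show ¬((1:Int) = aAB ∧ (0:Int) = aBC ∧ (0:Int) = aCA ∧ (1:Int) = oAB ∧ (1:Int) = oBC) from by omega),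
    if_neg (show ¬((1:Int) = aAB ∧ (1:Int) = aBC ∧ (1:Int) = aCA ∧ (1:Int) = oAB ∧ (1:Int) = oBC) from by omega)]

theorem solve_alt_none (aAB aBC aCA oAB oBC : Int)
    (h : ¬((aAB = 0 ∨ aAB = 1) ∧ (aBC = 0 ∨ aBC = 1) ∧ (aCA = 0 ∨ aCA = 1) ∧
           (oAB = 0 ∨ oAB = 1) ∧ (oBC = 0 ∨ oBC = 1))) :
    solve_alt aAB aBC aCA oAB oBC = (none, none, none) := by
  unfold solve_alt solveTry solveTryC solveFin
  simp only [List.findSome?_cons, List.findSome?_nil, land_zero', land_one_iff]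
  split_ifs <;> first | rfl | omega

-- ===== VERDICT (by name: the statement is the Claim_ definition above) =====
theorem solve_spec : Claim_equal_solve := by
  intro aAB aBC aCA oAB oBC _
  unfold Spec_solve
  by_cases h : (aAB = 0 ∨ aAB = 1) ∧ (aBC = 0 ∨ aBC = 1) ∧ (aCA = 0 ∨ aCA = 1) ∧
      (oAB = 0 ∨ oAB = 1) ∧ (oBC = 0 ∨ oBC = 1)
  · obtain ⟨h1, h2, h3, h4, h5⟩ := h
    rcases h1 with rfl | rfl <;> rcases h2 with rfl | rfl <;> rcases h3 with rfl | rfl <;>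
      rcases h4 with rfl | rfl <;> rcases h5 with rfl | rfl <;> decide
  · rw [solve_none _ _ _ _ _ h, solve_alt_none _ _ _ _ _ h]
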